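-- pv_equiv track=rewrite | github.com/Auorui/pyzjr | pyzjr/augmentation/Pixel/Crack.py | Classify_points_basedon_Bbox
-- ===== SOURCE A (Python) =====
-- def Classify_points_basedon_Bbox(gujia_pos, Bboxing):
--     """按照边界框对像素进行分类"""
--     classified_gujia_pos = {}
--     for point in gujia_pos:
--         x, y = point
--         for i, bbox in enumerate(Bboxing):
--             (minc, minr), (maxc, maxr) = bbox
--             if minc <= x <= maxc and minr <= y <= maxr:
--                 category_label = chr(ord('A') + i)
--                 if category_label not in classified_gujia_pos:
--                     classified_gujia_pos[category_label] = []
--                 classified_gujia_pos[category_label].append(point)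
--                 break
--     return classified_gujia_pos
-- ===== SOURCE B (Python) =====
-- def Classify_points_basedon_Bbox(gujia_pos, Bboxing):
--     """Functional regrouping: label every point once, then build each
--     category list by filtering, instead of mutating a dict point by point."""
--     def first_label(point):
--         x, y = point
--         for i, ((minc, minr), (maxc, maxr)) in enumerate(Bboxing):
--             if minc <= x <= maxc and minr <= y <= maxr:
--                 return chr(ord('A') + i)
--         return None
--     labels = [first_label(p) for p in gujia_pos]
--     seen = []
--     for lab in labels:
--         if lab is not None and lab not in seen:
--             seen.append(lab)
--     return {lab: [p for p, l in zip(gujia_pos, labels) if l == lab]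
--             for lab in seen}
-- ===== Notes on version B (the rewrite author's own statement) =====
-- stated objective: alternative
-- what changed: A classifies point-by-point, mutating a dict (create-key-then-append) inside a nested loop with break; B labels each point once with its first containing bbox, derives the first-occurrence key order, and builds each category list by a filter over the labelled points (no dict mutation).
import Mathlib
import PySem

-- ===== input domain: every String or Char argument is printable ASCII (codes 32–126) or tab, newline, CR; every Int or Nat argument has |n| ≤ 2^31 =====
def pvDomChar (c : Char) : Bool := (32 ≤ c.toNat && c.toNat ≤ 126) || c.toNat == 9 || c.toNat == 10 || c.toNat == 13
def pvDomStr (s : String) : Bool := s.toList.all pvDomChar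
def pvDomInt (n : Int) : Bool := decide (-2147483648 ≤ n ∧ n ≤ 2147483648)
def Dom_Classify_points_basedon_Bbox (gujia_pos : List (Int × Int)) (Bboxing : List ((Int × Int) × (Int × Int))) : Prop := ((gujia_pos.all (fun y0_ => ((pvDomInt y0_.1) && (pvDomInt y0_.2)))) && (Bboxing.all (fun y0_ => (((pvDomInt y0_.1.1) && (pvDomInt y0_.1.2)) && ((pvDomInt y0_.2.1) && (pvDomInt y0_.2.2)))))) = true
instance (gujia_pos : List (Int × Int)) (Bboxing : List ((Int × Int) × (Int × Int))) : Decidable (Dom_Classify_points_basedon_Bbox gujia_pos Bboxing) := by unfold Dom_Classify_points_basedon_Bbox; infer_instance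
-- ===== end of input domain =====

-- B relabels every point once and builds each category by filtering (functional
-- grouping) instead of A's point-by-point dict mutation; objective: alternative.

-- ===== PORT A =====
-- chr(ord('A') + i): exact for the enumerate indices 0 ≤ i (< 0xD800) that occur here
def pvLabel (i : Int) : String := String.ofList [Char.ofNat (65 + i).toNat]

-- inner 'for i, bbox in enumerate(Bboxing): … break' loop of A
def pvInnerA (point : Int × Int) (l : List (Int × ((Int × Int) × (Int × Int))))
    (d : PySem.Dict String (List (Int × Int))) : PySem.Dict String (List (Int × Int)) :=
  match l with
  | [] => d
  | (i, bbox) :: rest =>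
    let x := point.1; let y := point.2
    let minc := bbox.1.1; let minr := bbox.1.2; let maxc := bbox.2.1; let maxr := bbox.2.2
    if minc ≤ x ∧ x ≤ maxc ∧ minr ≤ y ∧ y ≤ maxr then
      let lab := pvLabel i
      let d1 := if d.contains lab then d else d.insert lab []
      d1.insert lab (d1.getD lab [] ++ [point])
    else pvInnerA point rest d

def Classify_points_basedon_Bbox (gujia_pos : List (Int × Int)) (Bboxing : List ((Int × Int) × (Int × Int))) : List (String × List (Int × Int)) :=
  (gujia_pos.foldl (fun d point => pvInnerA point (PySem.List.enumerate Bboxing) d)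
    PySem.Dict.empty).items

-- ===== PORT B =====
-- first_label: first enumerated bbox containing the point, as an Option label
def pvFirstLabel (point : Int × Int) (l : List (Int × ((Int × Int) × (Int × Int)))) : Option String :=
  match l with
  | [] => none
  | (i, bbox) :: rest =>
    let x := point.1; let y := point.2
    let minc := bbox.1.1; let minr := bbox.1.2; let maxc := bbox.2.1; let maxr := bbox.2.2
    if minc ≤ x ∧ x ≤ maxc ∧ minr ≤ y ∧ y ≤ maxr then some (pvLabel i)
    else pvFirstLabel point rest

def Classify_points_basedon_Bbox_alt (gujia_pos : List (Int × Int)) (Bboxing : List ((Int × Int) × (Int × Int))) : List (String × List (Int × Int)) :=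
  let labels := gujia_pos.map (fun p => pvFirstLabel p (PySem.List.enumerate Bboxing))
  let seen := labels.foldl (fun s l =>
    match l with
    | some lab => if lab ∈ s then s else s ++ [lab]
    | none => s) []
  seen.map (fun lab =>
    (lab, ((gujia_pos.zip labels).filter (fun q => q.2 == some lab)).map (·.1)))

-- ===== PRECONDITION & SPEC =====
def Spec_Classify_points_basedon_Bbox (gujia_pos : List (Int × Int)) (Bboxing : List ((Int × Int) × (Int × Int))) (out : List (String × List (Int × Int))) : Prop := out = Classify_points_basedon_Bbox_alt gujia_pos Bboxing
instance (gujia_pos : List (Int × Int)) (Bboxing : List ((Int × Int) × (Int × Int))) (out : List (String × List (Int × Int))) : Decidable (Spec_Classify_points_basedon_Bbox gujia_pos Bboxing out) := by unfold Spec_Classify_points_basedon_Bbox; infer_instance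

-- ===== CLAIM (what is proved, stated in full; the proofs are below) =====
def Claim_equal_Classify_points_basedon_Bbox : Prop := ∀ (gujia_pos : List (Int × Int)) (Bboxing : List ((Int × Int) × (Int × Int))), Dom_Classify_points_basedon_Bbox gujia_pos Bboxing → Spec_Classify_points_basedon_Bbox gujia_pos Bboxing (Classify_points_basedon_Bbox gujia_pos Bboxing)

-- ===== LEMMAS AND PROOFS =====

-- A's dict update for one labelled point
def pvUpd (d : PySem.Dict String (List (Int × Int))) (lab : String) (point : Int × Int) :
    PySem.Dict String (List (Int × Int)) :=
  let d1 := if d.contains lab then d else d.insert lab []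
  d1.insert lab (d1.getD lab [] ++ [point])

theorem pvInnerA_eq (point : Int × Int) (l : List (Int × ((Int × Int) × (Int × Int))))
    (d : PySem.Dict String (List (Int × Int))) :
    pvInnerA point l d = match pvFirstLabel point l with
      | none => d
      | some lab => pvUpd d lab point := by
  induction l with
  | nil => rfl
  | cons hd tl ih =>
    obtain ⟨i, bbox⟩ := hd
    simp only [pvInnerA, pvFirstLabel]
    by_cases h : bbox.1.1 ≤ point.1 ∧ point.1 ≤ bbox.2.1 ∧ bbox.1.2 ≤ point.2 ∧ point.2 ≤ bbox.2.2
    · simp only [if_pos h]; rfl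
    · simp only [if_neg h]; exact ih

-- seen-accumulator over a label list
def pvSeenStep (s : List String) (l : Option String) : List String :=
  match l with
  | some lab => if lab ∈ s then s else s ++ [lab]
  | none => s

theorem mem_seen_foldl (ls : List (Option String)) (s : List String) (lab : String) :
    lab ∈ ls.foldl pvSeenStep s ↔ lab ∈ s ∨ some lab ∈ ls := by
  induction ls generalizing s with
  | nil => simp
  | cons hd tl ih =>
    simp only [List.foldl_cons, ih, List.mem_cons]
    cases hd with
    | none => simp [pvSeenStep]
    | some x =>
      simp only [pvSeenStep, Option.some.injEq]
      split_ifs with h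
      · constructor
        · tauto
        · rintro (hs | rfl | ht)
          · tauto
          · exact Or.inl h
          · tauto
      · simp only [List.mem_append, List.mem_singleton]
        tauto

theorem nodup_seen_foldl (ls : List (Option String)) (s : List String) (hs : s.Nodup) :
    (ls.foldl pvSeenStep s).Nodup := by
  induction ls generalizing s with
  | nil => exact hs
  | cons hd tl ih =>
    apply ih
    cases hd with
    | none => exact hs
    | some x =>
      simp only [pvSeenStep]
      split_ifs with h
      · exact hs
      · simpa using List.Nodup.append hs (List.nodup_singleton x) (by simpa using h)

-- the filtered zip in B is a plain filter of the points
theorem zip_filter_eq_filter (pts : List (Int × Int)) (f : (Int × Int) → Option String)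
    (lab : String) :
    ((pts.zip (pts.map f)).filter (fun q => q.2 == some lab)).map (·.1)
      = pts.filter (fun p => f p == some lab) := by
  induction pts with
  | nil => rfl
  | cons p tl ih =>
    simp only [List.map_cons, List.zip_cons_cons, List.filter_cons]
    by_cases h : (f p == some lab) = true
    · simp [h, ih]
    · simp [h, ih]

-- main invariant, stated over an arbitrary point list processed so far
theorem main_inv (f : (Int × Int) → Option String) (pts : List (Int × Int)) :
    (pts.foldl (fun d point =>
        match f point with
        | none => d
        | some lab => pvUpd d lab point) PySem.Dict.empty).items
      = ((pts.map f).foldl pvSeenStep []).map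
          (fun lab => (lab, pts.filter (fun p => f p == some lab))) := by
  induction pts using List.reverseRecOn with
  | nil => rfl
  | append_singleton pts p ih =>
    rw [List.foldl_append, List.foldl_cons, List.foldl_nil, List.map_append, List.map_cons,
      List.map_nil, List.foldl_append, List.foldl_cons, List.foldl_nil]
    set seen := (pts.map f).foldl pvSeenStep [] with hseen
    set d := pts.foldl (fun d point =>
        match f point with
        | none => d
        | some lab => pvUpd d lab point) PySem.Dict.empty with hd
    have hitems : d.items = seen.map (fun lab => (lab, pts.filter (fun q => f q == some lab))) := ih
    have hnodupS : seen.Nodup := nodup_seen_foldl _ _ List.nodup_nil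
    have hkeys : d.keys = seen := by
      show d.items.map (fun p => p.1) = seen
      rw [hitems, List.map_map]
      exact List.map_id seen
    have hnodup : d.keys.Nodup := hkeys ▸ hnodupS
    have hmemS : ∀ lab : String, lab ∈ seen ↔ some lab ∈ pts.map f := by
      intro lab; rw [hseen, mem_seen_foldl]; simp
    cases hfp : f p with
    | none =>
      simp only [pvSeenStep, hitems]
      refine List.map_congr_left (fun lab _ => ?_)
      simp [List.filter_append, hfp]
    | some L =>
      simp only [pvSeenStep]
      have hcont : d.contains L = decide (L ∈ seen) := by
        rw [PySem.Dict.contains_eq_decide_mem_keys, hkeys]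
      by_cases hL : L ∈ seen
      · rw [if_pos hL]
        have hcontT : d.contains L = true := by rw [hcont]; exact decide_eq_true hL
        have hmemI : (L, pts.filter (fun q => f q == some L)) ∈ d.items := by
          rw [hitems]; exact List.mem_map_of_mem hL
        have hgetD : d.getD L [] = pts.filter (fun q => f q == some L) :=
          PySem.Dict.getD_of_mem_items d hmemI hnodup []
        simp only [pvUpd, hcontT, if_true]
        rw [PySem.Dict.items_insert_of_contains d _ hcontT, hgetD, hitems, List.map_map]
        refine List.map_congr_left (fun lab _ => ?_)
        by_cases he : lab = L
        · subst he; simp [List.filter_append, hfp]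
        · have h2 : (f p == some lab) = false := by simp [hfp, Ne.symm he]
          simp [List.filter_append, h2, he]
      · rw [if_neg hL]
        have hcontF : d.contains L = false := by rw [hcont]; exact decide_eq_false hL
        have hFnil : pts.filter (fun q => f q == some L) = [] := by
          refine List.filter_eq_nil_iff.mpr (fun q hq hc => ?_)
          refine hL ((hmemS L).mpr ?_)
          have hq' : f q = some L := by simpa using hc
          exact hq' ▸ List.mem_map_of_mem hq
        have hcont1 : (d.insert L ([] : List (Int × Int))).contains L = true :=
          PySem.Dict.contains_insert_self d L []
        have hgetD1 : (d.insert L ([] : List (Int × Int))).getD L [] = [] :=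
          PySem.Dict.getD_insert_self d L [] []
        simp only [pvUpd, hcontF, Bool.false_eq_true, if_false]
        rw [hgetD1, PySem.Dict.items_insert_of_contains (d.insert L []) _ hcont1,
          PySem.Dict.items_insert_of_not_contains d _ hcontF, List.map_append, hitems,
          List.map_map, List.map_append]
        refine congrArg₂ (· ++ ·) ?_ ?_
        · refine List.map_congr_left (fun lab hlab => ?_)
          have hne : lab ≠ L := fun he => hL (he ▸ hlab)
          have h2 : (f p == some lab) = false := by simp [hfp, Ne.symm hne]
          simp [List.filter_append, h2, hne]
        · simp [List.filter_append, hfp, hFnil]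

theorem Classify_points_basedon_Bbox_spec : Claim_equal_Classify_points_basedon_Bbox := by
  intro gujia_pos Bboxing _
  unfold Spec_Classify_points_basedon_Bbox Classify_points_basedon_Bbox Classify_points_basedon_Bbox_alt
  have h1 : (fun d point => pvInnerA point (PySem.List.enumerate Bboxing) d)
      = (fun d point =>
          match pvFirstLabel point (PySem.List.enumerate Bboxing) with
          | none => d
          | some lab => pvUpd d lab point) := by
    funext d point; exact pvInnerA_eq point _ d
  rw [h1, main_inv (fun p => pvFirstLabel p (PySem.List.enumerate Bboxing)) gujia_pos]
  simp only [zip_filter_eq_filter]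
  rfl
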